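-- pv_equiv track=rewrite | github.com/PanDAWMS/panda-bigmon-core | core/libs/jobconsumers.py | reconstructJobsConsumersHelper
-- ===== SOURCE A (Python) =====
-- def reconstructJobsConsumersHelper(chainsDict):
--     reconstructionDict = {}
--     modified = False
--     for pandaid, parentids in chainsDict.items():
--         if parentids and parentids[-1] in chainsDict:
--             if chainsDict[parentids[-1]]:
--                 reconstructionDict[pandaid] = parentids + chainsDict[parentids[-1]]
--                 modified = True
--             else:
--                 reconstructionDict[pandaid] = parentids
--         else:
--             reconstructionDict[pandaid] = parentids
--
--     if modified:
--         return reconstructJobsConsumersHelper(reconstructionDict)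
--     else:
--         return reconstructionDict
-- ===== SOURCE B (Python) =====
-- def reconstructJobsConsumersHelper(chainsDict):
--     # Expand each chain directly by following last-parent pointers to the end,
--     # instead of iterating global fixpoint passes over the whole dict.
--     result = {}
--     for pandaid, parentids in chainsDict.items():
--         out = list(parentids)
--         while out:
--             tail = chainsDict.get(out[-1])
--             if not tail:
--                 break
--             out += tail
--         result[pandaid] = out
--     return result
-- ===== Notes on version B (the rewrite author's own statement) =====
-- stated objective: alternative
-- what changed: A repeatedly rebuilds the whole dict in global fixpoint passes until no chain grows; B makes a single pass that expands each chain once by following last-parent pointers to the end.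
import Mathlib
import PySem

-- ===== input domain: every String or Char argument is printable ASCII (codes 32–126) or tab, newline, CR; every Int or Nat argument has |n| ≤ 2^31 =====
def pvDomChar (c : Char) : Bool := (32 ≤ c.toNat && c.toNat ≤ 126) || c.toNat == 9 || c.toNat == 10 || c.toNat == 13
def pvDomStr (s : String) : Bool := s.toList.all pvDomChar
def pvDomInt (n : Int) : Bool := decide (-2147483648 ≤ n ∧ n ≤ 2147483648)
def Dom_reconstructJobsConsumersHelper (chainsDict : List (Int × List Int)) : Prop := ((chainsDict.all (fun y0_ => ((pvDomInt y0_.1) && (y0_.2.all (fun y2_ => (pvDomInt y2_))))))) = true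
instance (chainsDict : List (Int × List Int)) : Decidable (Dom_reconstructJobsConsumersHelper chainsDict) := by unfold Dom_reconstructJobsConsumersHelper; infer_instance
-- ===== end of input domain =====

-- B replaces A's repeated whole-dict fixpoint passes by one direct pointer-chase per key (objective: alternative).

-- dict lookup (Python 'd[x]' / 'x in d' / 'd.get(x)'): first match in the association list
def pvLook (d : List (Int × List Int)) (x : Int) : Option (List Int) :=
  (PySem.Dict.mk d).get? x

-- ===== PORT A =====
-- one loop body of A's pass: 'if parentids and parentids[-1] in chainsDict: if chainsDict[parentids[-1]]: …'
-- ('parentids[-1]' on the guarded-nonempty list is its getLast, cf. PySem.List.pyGet?_neg_one;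
--  dict assignment 'reconstructionDict[pandaid] = …' appends: keys come from iterating a dict, hence fresh)
def pvPassStep (cur : List (Int × List Int)) (acc : List (Int × List Int) × Bool)
    (kv : Int × List Int) : List (Int × List Int) × Bool :=
  if h : kv.2 = [] then (acc.1 ++ [kv], acc.2)
  else
    match pvLook cur (kv.2.getLast h) with
    | some t => if t = [] then (acc.1 ++ [kv], acc.2) else (acc.1 ++ [(kv.1, kv.2 ++ t)], true)
    | none => (acc.1 ++ [kv], acc.2)

-- one recursive call of A: build reconstructionDict and the 'modified' flag
def pvPassA (cur : List (Int × List Int)) : List (Int × List Int) × Bool :=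
  cur.foldl (pvPassStep cur) ([], false)

-- A's self-recursion 'if modified: return reconstructJobsConsumersHelper(reconstructionDict)';
-- fuel only makes it total (Pre_ guarantees the fixpoint is reached before fuel runs out)
def pvReconAux : Nat → List (Int × List Int) → List (Int × List Int)
  | 0, cur => cur
  | n + 1, cur =>
    let r := pvPassA cur
    if r.2 then pvReconAux n r.1 else r.1

def reconstructJobsConsumersHelper (chainsDict : List (Int × List Int)) : List (Int × List Int) :=
  pvReconAux (chainsDict.length + 2) chainsDict

-- ===== PORT B =====
-- B's 'while out: tail = chainsDict.get(out[-1]); if not tail: break; out += tail'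
-- (fuel only makes the loop total; Pre_ guarantees it is large enough)
def pvExpand (d : List (Int × List Int)) : Nat → List Int → List Int
  | 0, out => out
  | fuel + 1, out =>
    if h : out = [] then out
    else
      match pvLook d (out.getLast h) with
      | some t => if t = [] then out else pvExpand d fuel (out ++ t)
      | none => out

def reconstructJobsConsumersHelper_alt (chainsDict : List (Int × List Int)) : List (Int × List Int) :=
  chainsDict.map (fun kv => (kv.1, pvExpand chainsDict (chainsDict.length + 1) kv.2))

-- ===== PRECONDITION & SPEC =====
-- the last-parent pointer leaving value x: defined when x is a key with a nonempty list
def pvChainStep (d : List (Int × List Int)) (x : Int) : Option Int :=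
  (pvLook d x).bind List.getLast?

def pvIter (d : List (Int × List Int)) : Nat → Option Int → Option Int
  | 0, o => o
  | n + 1, o => pvIter d n (o.bind (pvChainStep d))

-- Pre_ excludes (a) duplicate keys, which a Python dict argument cannot have, and (b) cyclic
-- parent chains, on which A recurses forever (RecursionError) and B's while-loop never ends:
-- every last-parent pointer chain must die out within |d|+1 steps (i.e. the chain graph is acyclic).
def Pre_reconstructJobsConsumersHelper (chainsDict : List (Int × List Int)) : Prop :=
  (chainsDict.map Prod.fst).Nodup ∧
    ∀ kv ∈ chainsDict, pvIter chainsDict (chainsDict.length + 1) kv.2.getLast? = none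

instance (chainsDict : List (Int × List Int)) : Decidable (Pre_reconstructJobsConsumersHelper chainsDict) := by
  unfold Pre_reconstructJobsConsumersHelper; infer_instance

def pvWitness_reconstructJobsConsumersHelper : (List (Int × List Int)) := [(1, [2]), (2, []), (3, [1, 2])]

def Spec_reconstructJobsConsumersHelper (chainsDict : List (Int × List Int)) (out : List (Int × List Int)) : Prop := out = reconstructJobsConsumersHelper_alt chainsDict
instance (chainsDict : List (Int × List Int)) (out : List (Int × List Int)) : Decidable (Spec_reconstructJobsConsumersHelper chainsDict out) := by unfold Spec_reconstructJobsConsumersHelper; infer_instance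

-- ===== CLAIM (what is proved, stated in full; the proofs are below) =====
def Claim_equal_reconstructJobsConsumersHelper : Prop := ∀ (chainsDict : List (Int × List Int)), Dom_reconstructJobsConsumersHelper chainsDict → Pre_reconstructJobsConsumersHelper chainsDict → Spec_reconstructJobsConsumersHelper chainsDict (reconstructJobsConsumersHelper chainsDict)

-- ===== LEMMAS AND PROOFS =====

-- 'no further extension possible' for a value list, judged against dict d
def pvDone (d : List (Int × List Int)) (v : List Int) : Bool :=
  match v.getLast? with
  | none => true
  | some x => match pvLook d x with
    | some t => t.isEmpty
    | none => true

-- whether A's loop body would extend value v (the 'modified = True' branch), judged against cur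
def pvMod (cur : List (Int × List Int)) (v : List Int) : Bool :=
  if h : v = [] then false
  else
    match pvLook cur (v.getLast h) with
    | some t => !t.isEmpty
    | none => false

-- the step A's loop body applies to one value
def pvStep1 (cur : List (Int × List Int)) (v : List Int) : List Int :=
  if h : v = [] then v
  else
    match pvLook cur (v.getLast h) with
    | some t => if t = [] then v else v ++ t
    | none => v

-- invariant: after some passes each entry is a partial expansion (w.r.t. the ORIGINAL dict) of the
-- original entry, and entries that can still grow have advanced at least pc extension steps
def pvEnt (d : List (Int × List Int)) (pc : Nat) (p q : Int × List Int) : Prop :=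
  q.1 = p.1 ∧ ∃ n, q.2 = pvExpand d n p.2 ∧ (pvDone d q.2 = true ∨ pc ≤ n)

theorem pvExpand_nil (d : List (Int × List Int)) (n : Nat) : pvExpand d n [] = [] := by
  cases n <;> simp [pvExpand]

theorem pvExpand_ne_nil (d : List (Int × List Int)) (n : Nat) (v : List Int) (h : v ≠ []) :
    pvExpand d n v ≠ [] := by
  induction n generalizing v with
  | zero => simpa [pvExpand]
  | succ n ih =>
    simp only [pvExpand, dif_neg h]
    cases hl : pvLook d (v.getLast h) with
    | none => exact h
    | some t =>
      by_cases ht : t = []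
      · simp [ht, h]
      · simp only [if_neg ht]
        exact ih _ (by simp [h])

theorem pvExpand_done (d : List (Int × List Int)) (n : Nat) (v : List Int)
    (h : pvDone d v = true) : pvExpand d n v = v := by
  cases n with
  | zero => rfl
  | succ n =>
    by_cases hv : v = []
    · simp [pvExpand, hv]
    · simp only [pvExpand, dif_neg hv]
      cases hl : pvLook d (v.getLast hv) with
      | none => rfl
      | some t =>
        simp only [pvDone, List.getLast?_eq_some_getLast hv, hl, List.isEmpty_iff] at h
        simp [h]

theorem pvDone_false_elim (d : List (Int × List Int)) (v : List Int)
    (h : pvDone d v = false) :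
    ∃ (hv : v ≠ []) (t : List Int), pvLook d (v.getLast hv) = some t ∧ t ≠ [] := by
  by_cases hv : v = []
  · subst hv; simp [pvDone] at h
  · refine ⟨hv, ?_⟩
    cases hl : pvLook d (v.getLast hv) with
    | none => simp [pvDone, List.getLast?_eq_some_getLast hv, hl] at h
    | some t =>
      simp only [pvDone, List.getLast?_eq_some_getLast hv, hl,] at h
      exact ⟨t, rfl, by simpa using h⟩

theorem pvExpand_append (d : List (Int × List Int)) (n : Nat) (v w : List Int) (hw : w ≠ []) :
    pvExpand d n (v ++ w) = v ++ pvExpand d n w := by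
  induction n generalizing w with
  | zero => rfl
  | succ n ih =>
    have hvw : v ++ w ≠ [] := by simp [hw]
    simp only [pvExpand, dif_neg hvw, dif_neg hw]
    rw [List.getLast_append_of_ne_nil hvw hw]
    cases hl : pvLook d (w.getLast hw) with
    | none => rfl
    | some t =>
      by_cases ht : t = []
      · simp [ht]
      · simp only [if_neg ht]
        rw [List.append_assoc]
        exact ih (w ++ t) (by simp [hw])

theorem pvExpand_not_done (d : List (Int × List Int)) (n : Nat) (v : List Int)
    (hv : v ≠ []) (t : List Int) (hl : pvLook d (v.getLast hv) = some t) (ht : t ≠ []) :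
    pvExpand d (n + 1) v = pvExpand d n (v ++ t) := by
  simp [pvExpand, dif_neg hv, hl, if_neg ht]

theorem pvExpand_add (d : List (Int × List Int)) (n m : Nat) (v : List Int) :
    pvExpand d (n + m) v = pvExpand d m (pvExpand d n v) := by
  induction n generalizing v with
  | zero => simp [pvExpand]
  | succ n ih =>
    by_cases hd : pvDone d v = true
    · rw [pvExpand_done d _ _ hd, pvExpand_done d _ _ hd, pvExpand_done d _ _ hd]
    · obtain ⟨hv, t, hl, ht⟩ := pvDone_false_elim d v (by simpa using hd)
      have h1 : n + 1 + m = (n + m) + 1 := by omega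
      rw [h1, pvExpand_not_done d (n + m) v hv t hl ht, pvExpand_not_done d n v hv t hl ht, ih]

theorem pvIter_done (d : List (Int × List Int)) (f : Nat) (v : List Int)
    (h : pvIter d f v.getLast? = none) : pvDone d (pvExpand d f v) = true := by
  induction f generalizing v with
  | zero =>
    simp only [pvIter] at h
    simp [pvExpand, pvDone, h]
  | succ f ih =>
    by_cases hd : pvDone d v = true
    · rwa [pvExpand_done d _ _ hd]
    · obtain ⟨hv, t, hl, ht⟩ := pvDone_false_elim d v (by simpa using hd)
      rw [pvExpand_not_done d f v hv t hl ht]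
      apply ih
      have hstep : (v.getLast?.bind (pvChainStep d)) = (v ++ t).getLast? := by
        rw [List.getLast?_eq_some_getLast hv]
        simp only [Option.bind_some, pvChainStep, hl, Option.bind_some]
        exact (List.getLast?_append_of_ne_nil _ ht).symm
      simp only [pvIter] at h
      rwa [hstep] at h

theorem pvExpand_final_eq (d : List (Int × List Int)) (n f : Nat) (v : List Int)
    (hn : pvDone d (pvExpand d n v) = true) (hf : pvDone d (pvExpand d f v) = true) :
    pvExpand d n v = pvExpand d f v := by
  rcases Nat.le_total n f with h | h
  · have : f = n + (f - n) := by omega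
    rw [this] at hf ⊢
    rw [pvExpand_add, pvExpand_done d _ _ hn]
  · have : n = f + (n - f) := by omega
    rw [this] at hn ⊢
    rw [pvExpand_add, pvExpand_done d _ _ hf]

theorem pvPass_foldl (cur : List (Int × List Int)) :
    ∀ (l : List (Int × List Int)) (acc : List (Int × List Int)) (b : Bool),
      l.foldl (pvPassStep cur) (acc, b) =
        (acc ++ l.map (fun kv => (kv.1, pvStep1 cur kv.2)), b || l.any (fun kv => pvMod cur kv.2)) := by
  intro l
  induction l with
  | nil => simp
  | cons kv l ih =>
    intro acc b
    obtain ⟨k, v⟩ := kv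
    simp only [List.foldl_cons, List.map_cons, List.any_cons]
    by_cases hv : v = []
    · rw [show pvPassStep cur (acc, b) (k, v) = (acc ++ [(k, v)], b) by simp [pvPassStep, hv]]
      rw [ih]
      simp [pvStep1, pvMod, hv]
    · cases hl : pvLook cur (v.getLast hv) with
      | none =>
        rw [show pvPassStep cur (acc, b) (k, v) = (acc ++ [(k, v)], b) by simp [pvPassStep, dif_neg hv, hl]]
        rw [ih]
        simp [pvStep1, pvMod, dif_neg hv, hl]
      | some t =>
        by_cases ht : t = []
        · rw [show pvPassStep cur (acc, b) (k, v) = (acc ++ [(k, v)], b) by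
            simp [pvPassStep, dif_neg hv, hl, ht]]
          rw [ih]
          simp [pvStep1, pvMod, dif_neg hv, hl, ht]
        · rw [show pvPassStep cur (acc, b) (k, v) = (acc ++ [(k, v ++ t)], true) by
            simp [pvPassStep, dif_neg hv, hl, ht]]
          rw [ih]
          simp [pvStep1, pvMod, dif_neg hv, hl, ht]

theorem pvStep1_of_not_mod (cur : List (Int × List Int)) (v : List Int)
    (h : pvMod cur v = false) : pvStep1 cur v = v := by
  by_cases hv : v = []
  · simp [pvStep1, hv]
  · cases hl : pvLook cur (v.getLast hv) with
    | none => simp [pvStep1, dif_neg hv, hl]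
    | some t =>
      simp only [pvMod, dif_neg hv, hl, Bool.not_eq_false', List.isEmpty_iff] at h
      simp [pvStep1, dif_neg hv, hl, h]

theorem pvLook_rel (D : List (Int × List Int)) (pc : Nat) :
    ∀ d cur, List.Forall₂ (pvEnt D pc) d cur → ∀ x,
      (∃ n v, pvLook d x = some v ∧ pvLook cur x = some (pvExpand D n v)) ∨
      (pvLook d x = none ∧ pvLook cur x = none) := by
  intro d cur hrel
  induction hrel with
  | nil => intro x; right; simp [pvLook, PySem.Dict.get?]
  | @cons p q d' cur' hpq hrel ih =>
    intro x
    obtain ⟨hk, n, hval, _⟩ := hpq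
    by_cases hx : p.1 == x
    · left
      refine ⟨n, p.2, ?_, ?_⟩
      · show (PySem.Dict.mk (p :: d')).get? x = some p.2
        rw [show (p : Int × List Int) = (p.1, p.2) from rfl, PySem.Dict.get?_mk_cons]
        simp [hx]
      · show (PySem.Dict.mk (q :: cur')).get? x = some (pvExpand D n p.2)
        rw [show (q : Int × List Int) = (q.1, q.2) from rfl, PySem.Dict.get?_mk_cons]
        simp [hk, hx, hval]
    · have h1 : pvLook (p :: d') x = pvLook d' x := by
        show (PySem.Dict.mk (p :: d')).get? x = _
        rw [show (p : Int × List Int) = (p.1, p.2) from rfl, PySem.Dict.get?_mk_cons]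
        simp [hx]; rfl
      have h2 : pvLook (q :: cur') x = pvLook cur' x := by
        show (PySem.Dict.mk (q :: cur')).get? x = _
        rw [show (q : Int × List Int) = (q.1, q.2) from rfl, PySem.Dict.get?_mk_cons]
        simp [hk, hx]; rfl
      rw [h1, h2]
      exact ih x

theorem pvDone_transfer (D : List (Int × List Int)) (pc : Nat) (cur : List (Int × List Int))
    (hrel : List.Forall₂ (pvEnt D pc) D cur) (v : List Int) :
    pvDone cur v = pvDone D v := by
  cases hgl : v.getLast? with
  | none => simp [pvDone, hgl]
  | some x =>
    rcases pvLook_rel D pc D cur hrel x with ⟨n, w, hD, hcur⟩ | ⟨hD, hcur⟩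
    · by_cases hw : w = []
      · simp [pvDone, hgl, hD, hcur, hw, pvExpand_nil]
      · simp only [pvDone, hgl, hD, hcur]
        rw [List.isEmpty_eq_false_iff.2 (pvExpand_ne_nil D n w hw), List.isEmpty_eq_false_iff.2 hw]
    · simp [pvDone, hgl, hD, hcur]

theorem pvMod_eq_not_done (cur : List (Int × List Int)) (v : List Int) :
    pvMod cur v = !pvDone cur v := by
  by_cases hv : v = []
  · simp [pvMod, pvDone, hv]
  · cases hl : pvLook cur (v.getLast hv) with
    | none => simp [pvMod, pvDone, dif_neg hv, List.getLast?_eq_some_getLast hv, hl]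
    | some t => simp [pvMod, pvDone, dif_neg hv, List.getLast?_eq_some_getLast hv, hl]

theorem pvStep1_of_mod (cur : List (Int × List Int)) (v : List Int)
    (h : pvMod cur v = true) :
    ∃ (hv : v ≠ []) (w : List Int),
      pvLook cur (v.getLast hv) = some w ∧ w ≠ [] ∧ pvStep1 cur v = v ++ w := by
  have hd : pvDone cur v = false := by
    rw [pvMod_eq_not_done] at h; simpa using h
  obtain ⟨hv, w, hl, hw⟩ := pvDone_false_elim cur v hd
  exact ⟨hv, w, hl, hw, by simp [pvStep1, dif_neg hv, hl, hw]⟩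

theorem pvPass_rel (D : List (Int × List Int)) (pc : Nat) (cur : List (Int × List Int))
    (hrel : List.Forall₂ (pvEnt D pc) D cur) :
    List.Forall₂ (pvEnt D (pc + 1)) D ((pvPassA cur).1) := by
  have hpass : (pvPassA cur).1 = cur.map (fun kv => (kv.1, pvStep1 cur kv.2)) := by
    unfold pvPassA
    rw [pvPass_foldl cur cur [] false]
    simp
  rw [hpass, List.forall₂_map_right_iff]
  refine hrel.imp ?_
  intro p q hpq
  obtain ⟨hk, n, hval, hor⟩ := hpq
  cases hm : pvMod cur q.2 with
  | false =>
    rw [pvStep1_of_not_mod cur q.2 hm]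
    have hdD : pvDone D q.2 = true := by
      rw [pvMod_eq_not_done] at hm
      rw [← pvDone_transfer D pc cur hrel]
      simpa using hm
    exact ⟨hk, n, hval, Or.inl hdD⟩
  | true =>
    obtain ⟨hv, w, hl, hw, hstep⟩ := pvStep1_of_mod cur q.2 hm
    have hdD : pvDone D q.2 = false := by
      rw [pvMod_eq_not_done] at hm
      rw [← pvDone_transfer D pc cur hrel]
      simpa using hm
    obtain ⟨hv', v0, hlD, hv0⟩ := pvDone_false_elim D q.2 hdD
    -- identify w as an expansion of v0
    rcases pvLook_rel D pc D cur hrel (q.2.getLast hv) with ⟨m, u, hDu, hcuru⟩ | ⟨hnone, _⟩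
    · have hu : u = v0 := by
        rw [hDu] at hlD; exact (Option.some.injEq _ _ ▸ hlD).symm ▸ rfl
      have hwu : w = pvExpand D m u := by
        rw [hcuru] at hl; exact (Option.some.inj hl).symm
      have hpc : pc ≤ n := by
        rcases hor with h | h
        · rw [hdD] at h; cases h
        · exact h
      refine ⟨hk, n + 1 + m, ?_, Or.inr (by omega)⟩
      show pvStep1 cur q.2 = pvExpand D (n + 1 + m) p.2
      rw [hstep]
      have e1 : pvExpand D (n + 1) p.2 = q.2 ++ v0 := by
        rw [pvExpand_add D n 1 p.2, ← hval]
        simp [pvExpand, dif_neg hv, hlD, if_neg hv0]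
      have e2 : pvExpand D (n + 1 + m) p.2 = q.2 ++ pvExpand D m v0 := by
        rw [pvExpand_add D (n + 1) m p.2, e1, pvExpand_append D m q.2 v0 hv0]
      rw [e2, hwu, hu]
    · rw [hnone] at hlD; cases hlD

theorem pvEnt_final (D : List (Int × List Int)) (p q : Int × List Int)
    (hp : p ∈ D) (hpre : Pre_reconstructJobsConsumersHelper D)
    (n : Nat) (hq : q.2 = pvExpand D n p.2)
    (hdone : pvDone D q.2 = true ∨ D.length + 1 ≤ n) :
    q.2 = pvExpand D (D.length + 1) p.2 := by
  have hiter := hpre.2 p hp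
  have hfin : pvDone D (pvExpand D (D.length + 1) p.2) = true := pvIter_done D _ _ hiter
  rcases hdone with hd | hn
  · rw [hq] at hd ⊢
    exact pvExpand_final_eq D n (D.length + 1) p.2 hd hfin
  · rw [hq]
    have : n = (D.length + 1) + (n - (D.length + 1)) := by omega
    rw [this, pvExpand_add, pvExpand_done D _ _ hfin]

theorem pvRel_final (D : List (Int × List Int)) (hpre : Pre_reconstructJobsConsumersHelper D)
    (pc : Nat) (hpc : D.length + 1 ≤ pc) :
    ∀ d' cur', List.Forall₂ (pvEnt D pc) d' cur' → (∀ kv ∈ d', kv ∈ D) →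
      cur' = d'.map (fun kv => (kv.1, pvExpand D (D.length + 1) kv.2)) := by
  intro d' cur' hrel
  induction hrel with
  | nil => intro _; rfl
  | @cons p q d'' cur'' hpq hrel ih =>
    intro hmem
    obtain ⟨hk, n, hval, hor⟩ := hpq
    have hq2 : q.2 = pvExpand D (D.length + 1) p.2 := by
      apply pvEnt_final D p q (hmem p (by simp)) hpre n hval
      rcases hor with h | h
      · exact Or.inl h
      · exact Or.inr (by omega)
    simp only [List.map_cons]
    rw [ih (fun kv hkv => hmem kv (by simp [hkv]))]
    congr 1
    exact Prod.ext hk hq2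

theorem pvStrengthen (D : List (Int × List Int)) (pc pc' : Nat) :
    ∀ d' cur', List.Forall₂ (pvEnt D pc) d' cur' →
      (∀ q ∈ cur', pvDone D q.2 = true) → List.Forall₂ (pvEnt D pc') d' cur' := by
  intro d' cur' hrel
  induction hrel with
  | nil => intro _; exact List.Forall₂.nil
  | @cons p q d'' cur'' hpq hrel ih =>
    intro hdone
    obtain ⟨hk, n, hval, _⟩ := hpq
    exact List.Forall₂.cons ⟨hk, n, hval, Or.inl (hdone q (by simp))⟩
      (ih (fun q' hq' => hdone q' (by simp [hq'])))

theorem pvMain (D : List (Int × List Int)) (hpre : Pre_reconstructJobsConsumersHelper D) :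
    ∀ (f pc : Nat) (cur : List (Int × List Int)),
      List.Forall₂ (pvEnt D pc) D cur → D.length + 2 ≤ f + pc →
      pvReconAux f cur = reconstructJobsConsumersHelper_alt D := by
  intro f
  induction f with
  | zero =>
    intro pc cur hrel hf
    show cur = _
    exact pvRel_final D hpre pc (by omega) D cur hrel (fun kv h => h)
  | succ f ih =>
    intro pc cur hrel hf
    have hpass1 : (pvPassA cur).1 = cur.map (fun kv => (kv.1, pvStep1 cur kv.2)) := by
      unfold pvPassA; rw [pvPass_foldl cur cur [] false]; simp
    have hpass2 : (pvPassA cur).2 = cur.any (fun kv => pvMod cur kv.2) := by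
      unfold pvPassA; rw [pvPass_foldl cur cur [] false]; simp
    simp only [pvReconAux]
    cases hany : cur.any (fun kv => pvMod cur kv.2) with
    | true =>
      rw [hpass2, hany]
      simp only [if_true]
      exact ih (pc + 1) (pvPassA cur).1 (pvPass_rel D pc cur hrel) (by omega)
    | false =>
      rw [hpass2, hany]
      simp only [if_false, Bool.false_eq_true]
      have hall : ∀ kv ∈ cur, pvMod cur kv.2 = false := by
        simpa [List.any_eq_false] using hany
      have hid : cur.map (fun kv => (kv.1, pvStep1 cur kv.2)) = cur := by
        rw [List.map_congr_left (g := fun kv => kv)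
          (fun kv h => by rw [pvStep1_of_not_mod cur kv.2 (hall kv h)])]
        exact List.map_id cur
      rw [hpass1, hid]
      have hdoneD : ∀ q ∈ cur, pvDone D q.2 = true := by
        intro q hq
        rw [← pvDone_transfer D pc cur hrel]
        have := hall q hq
        rw [pvMod_eq_not_done] at this
        simpa using this
      exact pvRel_final D hpre (D.length + 1) le_rfl D cur
        (pvStrengthen D pc (D.length + 1) D cur hrel hdoneD) (fun kv h => h)

theorem pvRel_refl (D : List (Int × List Int)) :
    List.Forall₂ (pvEnt D 0) D D :=
  List.forall₂_same.2 (fun _ _ => ⟨rfl, 0, rfl, Or.inr le_rfl⟩)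

-- ===== VERDICT (by name: the statement is the Claim_ definition above) =====
theorem reconstructJobsConsumersHelper_spec : Claim_equal_reconstructJobsConsumersHelper := by
  intro d _hdom hpre
  unfold Spec_reconstructJobsConsumersHelper reconstructJobsConsumersHelper
  exact pvMain d hpre (d.length + 2) 0 d (pvRel_refl d) (by omega)
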